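-- pv_equiv track=rewrite | github.com/JuliaHealth/NeuroAnalyzer.jl | src/tmp/edfreader.py | __is_duration_number
-- ===== SOURCE A (Python) =====
-- def __is_duration_number(str_):
--   hasdot = 0
--
--   l = len(str_)
--   if l < 1:
--     return 1
--
--   if (str_[0] == 46) or (str_[l-1] == 46):
--     return 1
--
--   for i in range(0, l):
--     if str_[i] == 0:
--       if i < 1:
--         return 1
--       else:
--         return 0
--
--     if str_[i] == 46:
--       if hasdot != 0:
--         return 1
--       hasdot += 1
--     else:
--       if (str_[i] < 48) or (str_[i] > 57):
--         return 1
--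
--   return 0
-- ===== SOURCE B (Python) =====
-- def __is_duration_number(str_):
--   l = len(str_)
--   if l < 1:
--     return 1
--   if str_[0] == 46 or str_[l - 1] == 46:
--     return 1
--   idx = str_.index(0) if 0 in str_ else -1
--   if idx == 0:
--     return 1
--   content = str_ if idx == -1 else str_[:idx]
--   if content.count(46) > 1:
--     return 1
--   if all(48 <= c <= 57 or c == 46 for c in content):
--     return 0
--   return 1
-- ===== Notes on version B (the rewrite author's own statement) =====
-- stated objective: alternative
-- what changed: Replaces A's single interleaved early-exit scan (index loop carrying a hasdot flag with in-loop null handling) by an index-then-aggregate decomposition: find the first null with index(), slice the content before it, then validate with two separate aggregate passes (count of dots, all-digits-or-dot).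
import Mathlib
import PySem

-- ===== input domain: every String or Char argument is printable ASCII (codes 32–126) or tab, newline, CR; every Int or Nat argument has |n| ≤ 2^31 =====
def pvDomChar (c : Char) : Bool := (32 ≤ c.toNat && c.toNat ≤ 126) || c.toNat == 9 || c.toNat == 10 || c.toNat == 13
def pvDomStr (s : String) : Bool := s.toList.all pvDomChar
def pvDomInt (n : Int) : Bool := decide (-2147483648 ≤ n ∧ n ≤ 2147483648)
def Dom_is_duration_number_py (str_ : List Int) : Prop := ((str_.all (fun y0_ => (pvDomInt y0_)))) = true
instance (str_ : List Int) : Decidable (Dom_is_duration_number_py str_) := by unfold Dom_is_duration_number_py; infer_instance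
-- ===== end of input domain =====

-- B restructures A's single interleaved early-exit scan into index-then-aggregate checks
-- (first-null position, slice, dot count, all-digits-or-dot); same return value (objective: alternative).

-- ===== PORT A =====
-- A's for-loop: structural recursion over the remaining list carrying the index i and hasdot
def isDurLoopA : List Int → Int → Int → Int
  | [], _, _ => 0
  | c :: rest, i, hasdot =>
    if c = 0 then
      if i < 1 then 1 else 0
    else if c = 46 then
      if hasdot ≠ 0 then 1 else isDurLoopA rest (i + 1) (hasdot + 1)
    else if c < 48 ∨ c > 57 then 1
    else isDurLoopA rest (i + 1) hasdot

def is_duration_number_py (str_ : List Int) : Int :=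
  let l : Int := PySem.List.len str_
  if l < 1 then 1
  else if PySem.List.pyGetD str_ 0 0 = 46 ∨ PySem.List.pyGetD str_ (l - 1) 0 = 46 then 1
  else isDurLoopA str_ 0 0

-- ===== PORT B =====
def is_duration_number_py_alt (str_ : List Int) : Int :=
  let l : Int := PySem.List.len str_
  if l < 1 then 1
  else if PySem.List.pyGetD str_ 0 0 = 46 ∨ PySem.List.pyGetD str_ (l - 1) 0 = 46 then 1
  else
    let idx : Int := match PySem.List.index? str_ 0 with
      | some k => (k : Int)
      | none => -1
    if idx = 0 then 1
    else
      let content := if idx = -1 then str_ else PySem.List.slice str_ none (some idx)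
      if (PySem.List.count content 46 : Int) > 1 then 1
      else if content.all (fun c => decide ((48 ≤ c ∧ c ≤ 57) ∨ c = 46)) then 0
      else 1

-- ===== PRECONDITION & SPEC =====
def Spec_is_duration_number_py (str_ : List Int) (out : Int) : Prop := out = is_duration_number_py_alt str_
instance (str_ : List Int) (out : Int) : Decidable (Spec_is_duration_number_py str_ out) := by unfold Spec_is_duration_number_py; infer_instance

-- ===== CLAIM =====
def Claim_equal_is_duration_number_py : Prop := ∀ (str_ : List Int), Dom_is_duration_number_py str_ → Spec_is_duration_number_py str_ (is_duration_number_py str_)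

-- ===== LEMMAS AND PROOFS =====
-- prefix before the first null: the two characterisations of B's 'content'
theorem tw_none (xs : List Int) (h : PySem.List.index? xs 0 = none) :
    List.takeWhile (fun x => decide (x ≠ 0)) xs = xs := by
  rw [PySem.List.index?_eq_none_iff] at h
  induction xs with
  | nil => rfl
  | cons c rest ih =>
    simp only [List.mem_cons, not_or] at h
    simp only [List.takeWhile, Ne.symm h.1, ne_eq, not_false_eq_true,
      decide_true, List.cons.injEq, true_and]
    exact ih h.2

theorem tw_some (xs : List Int) (k : Nat) (h : PySem.List.index? xs 0 = some k) :
    xs.take k = List.takeWhile (fun x => decide (x ≠ 0)) xs := by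
  induction xs generalizing k with
  | nil => simp [PySem.List.index?_eq_idxOf?, List.idxOf?] at h
  | cons c rest ih =>
    by_cases hc : c = 0
    · subst hc
      rw [PySem.List.index?_cons_self] at h
      cases h
      simp [List.takeWhile]
    · rw [PySem.List.index?_cons_of_ne rest hc] at h
      cases hk : PySem.List.index? rest 0 with
      | none => rw [hk] at h; simp at h
      | some m =>
        rw [hk] at h
        simp only [Option.map_some, Option.some.injEq] at h
        subst h
        simp [List.takeWhile, hc, ih m hk]

theorem isDurLoopA_char (xs : List Int) (i hasdot : Int) (hi : 1 ≤ i)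
    (hd : hasdot = 0 ∨ hasdot = 1) :
    isDurLoopA xs i hasdot =
      (if (xs.takeWhile (fun x => decide (x ≠ 0))).all (fun c => decide ((48 ≤ c ∧ c ≤ 57) ∨ c = 46))
          ∧ ((xs.takeWhile (fun x => decide (x ≠ 0))).count 46 : Int) + hasdot ≤ 1 then 0 else 1) := by
  induction xs generalizing i hasdot with
  | nil => simp [isDurLoopA]; omega
  | cons c rest ih =>
    by_cases hc0 : c = 0
    · subst hc0
      simp only [isDurLoopA, if_neg (by omega : ¬ i < 1), List.takeWhile]
      norm_num
      omega
    · by_cases hc46 : c = 46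
      · subst hc46
        rcases hd with h0 | h1
        · subst h0
          simp only [isDurLoopA, if_neg (by norm_num : ¬ (46:Int) = 0),
            if_neg (by norm_num : ¬ (0:Int) ≠ 0)]
          rw [if_pos trivial, show (0:Int)+1 = 1 from rfl, ih (i + 1) 1 (by omega) (Or.inr rfl)]
          simp only [List.takeWhile]
          norm_num [List.count_cons]
        · subst h1
          simp only [isDurLoopA, if_neg (by norm_num : ¬ (46:Int) = 0),
            if_pos (by norm_num : (1:Int) ≠ 0), List.takeWhile]
          norm_num [List.count_cons]
      · by_cases hval : c < 48 ∨ c > 57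
        · have hA : isDurLoopA (c :: rest) i hasdot = 1 := by
            simp only [isDurLoopA]
            rw [if_neg hc0, if_neg hc46, if_pos hval]
          rw [hA, if_neg]
          rintro ⟨hall, _⟩
          simp only [List.takeWhile, ne_eq, hc0, not_false_eq_true, decide_true, List.all_cons,
            Bool.and_eq_true, decide_eq_true_eq] at hall
          rcases hall.1 with ⟨_, _⟩ | hh <;> omega
        · simp only [isDurLoopA, if_neg hc0, if_neg hc46, if_neg hval]
          rw [ih (i + 1) hasdot (by omega) hd]
          have hcv : (48 ≤ c ∧ c ≤ 57) := by omega
          simp only [List.takeWhile, ne_eq, hc0, not_false_eq_true, decide_true, List.all_cons,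
            List.count_cons, hc46]
          norm_num [hcv, hc46]

theorem loop_start (c : Int) (rest : List Int) (hc0 : c ≠ 0) (hc46 : c ≠ 46) :
    isDurLoopA (c :: rest) 0 0 =
      (if ((c :: rest).takeWhile (fun x => decide (x ≠ 0))).all
            (fun c => decide ((48 ≤ c ∧ c ≤ 57) ∨ c = 46))
          ∧ (((c :: rest).takeWhile (fun x => decide (x ≠ 0))).count 46 : Int) + 0 ≤ 1
        then 0 else 1) := by
  by_cases hval : c < 48 ∨ c > 57
  · have hA : isDurLoopA (c :: rest) 0 0 = 1 := by
      simp only [isDurLoopA]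
      rw [if_neg hc0, if_neg hc46, if_pos hval]
    rw [hA, if_neg]
    rintro ⟨hall, _⟩
    simp only [List.takeWhile, ne_eq, hc0, not_false_eq_true, decide_true, List.all_cons,
      Bool.and_eq_true, decide_eq_true_eq] at hall
    rcases hall.1 with ⟨_, _⟩ | hh <;> omega
  · have hA : isDurLoopA (c :: rest) 0 0 = isDurLoopA rest 1 0 := by
      simp only [isDurLoopA]
      rw [if_neg hc0, if_neg hc46, if_neg hval]
      rfl
    rw [hA, isDurLoopA_char rest 1 0 (by omega) (Or.inl rfl)]
    have hcv : (48 ≤ c ∧ c ≤ 57) := by omega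
    simp only [List.takeWhile, ne_eq, hc0, not_false_eq_true, decide_true, List.all_cons,
      List.count_cons, hc46]
    norm_num [hcv, hc46]

-- B's tail (after the shared guards) in aggregate form
theorem alt_tail_char (xs : List Int) (content : List Int)
    (hcontent : content = List.takeWhile (fun x => decide (x ≠ 0)) xs) :
    (if (PySem.List.count content 46 : Int) > 1 then (1:Int)
      else if content.all (fun c => decide ((48 ≤ c ∧ c ≤ 57) ∨ c = 46)) then 0
      else 1) =
      (if (xs.takeWhile (fun x => decide (x ≠ 0))).all (fun c => decide ((48 ≤ c ∧ c ≤ 57) ∨ c = 46))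
          ∧ ((xs.takeWhile (fun x => decide (x ≠ 0))).count 46 : Int) + 0 ≤ 1 then 0 else 1) := by
  subst hcontent
  rw [PySem.List.count_eq]
  by_cases h1 : ((List.takeWhile (fun x => decide (x ≠ 0)) xs).count 46 : Int) > 1
  · rw [if_pos h1, if_neg (fun h => absurd h.2 (by omega))]
  · rw [if_neg h1]
    by_cases h2 : (List.takeWhile (fun x => decide (x ≠ 0)) xs).all
        (fun c => decide ((48 ≤ c ∧ c ≤ 57) ∨ c = 46)) = true
    · rw [if_pos h2, if_pos ⟨h2, by omega⟩]
    · rw [if_neg h2, if_neg (fun h => h2 h.1)]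

-- ===== VERDICT =====
theorem is_duration_number_py_spec : Claim_equal_is_duration_number_py := by
  intro str_ _
  unfold Spec_is_duration_number_py is_duration_number_py is_duration_number_py_alt
  simp only [PySem.List.len_eq]
  cases str_ with
  | nil => simp
  | cons c rest =>
    by_cases hdot : PySem.List.pyGetD (c :: rest) 0 0 = 46 ∨
        PySem.List.pyGetD (c :: rest) (((c :: rest).length : Int) - 1) 0 = 46
    · simp only [hdot, if_true, if_neg (by simp : ¬ ((c :: rest).length : Int) < 1)]
    · rw [if_neg (by simp), if_neg hdot, if_neg (by simp), if_neg hdot]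
      have hc46 : c ≠ 46 := by
        intro h
        exact hdot (Or.inl (by rw [PySem.List.pyGetD_zero_cons, h]))
      by_cases hc0 : c = 0
      · subst hc0
        rw [PySem.List.index?_cons_self]
        simp [isDurLoopA]
      · rw [PySem.List.index?_cons_of_ne rest hc0]
        cases hk : PySem.List.index? rest 0 with
        | none =>
          simp only [Option.map_none]
          rw [if_neg (by norm_num), if_pos trivial]
          have hcontent : (c :: rest : List Int) =
              List.takeWhile (fun x => decide (x ≠ 0)) (c :: rest) := by
            refine (tw_none (c :: rest) ?_).symm
            rw [PySem.List.index?_eq_none_iff]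
            rw [PySem.List.index?_eq_none_iff] at hk
            simp [Ne.symm hc0, hk]
          rw [loop_start c rest hc0 hc46]
          exact (alt_tail_char (c :: rest) (c :: rest) hcontent).symm
        | some m =>
          simp only [Option.map_some]
          have hidx : PySem.List.index? (c :: rest) 0 = some (m + 1) := by
            rw [PySem.List.index?_cons_of_ne rest hc0, hk]
            rfl
          have hcontent : PySem.List.slice (c :: rest) none (some (((m + 1 : Nat)) : Int)) =
              List.takeWhile (fun x => decide (x ≠ 0)) (c :: rest) := by
            rw [PySem.List.slice_to_natCast (c :: rest) (m + 1)]
            exact tw_some (c :: rest) (m + 1) hidx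
          rw [if_neg (show ¬ (((m + 1 : Nat)) : Int) = 0 by push_cast; omega),
            if_neg (show ¬ (((m + 1 : Nat)) : Int) = -1 by push_cast; omega), hcontent,
            loop_start c rest hc0 hc46]
          exact (alt_tail_char (c :: rest) _ rfl).symm
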